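-- pv_equiv track=rewrite | github.com/Alexander671/My_Study | STEPIK/Algorithm/Chapter_3/3.py | various_terms
-- ===== SOURCE A (Python) =====
-- def various_terms(n):
--     changed_sum = 0
--     addend = []
--     for i in range(1, n + 1):
--         changed_sum += i
--
--         if changed_sum > n:
--             addend = addend[:-1]
--             addend.append(n - sum(addend))
--             return addend
--
--         addend.append(i)
--
--     return addend
-- ===== SOURCE B (Python) =====
-- import math
--
-- def various_terms(n):
--     if n <= 0:
--         return []
--     m = (math.isqrt(8 * n + 1) - 1) // 2
--     return list(range(1, m)) + [n - (m - 1) * m // 2]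
-- ===== Notes on version B (the rewrite author's own statement) =====
-- stated objective: simpler
-- what changed: Replaces A's accumulating loop and its sum-at-exit by closed-form arithmetic: the largest m whose triangular number is at most n is obtained via math.isqrt and the answer list is built directly from a range plus the remainder term.
import Mathlib
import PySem

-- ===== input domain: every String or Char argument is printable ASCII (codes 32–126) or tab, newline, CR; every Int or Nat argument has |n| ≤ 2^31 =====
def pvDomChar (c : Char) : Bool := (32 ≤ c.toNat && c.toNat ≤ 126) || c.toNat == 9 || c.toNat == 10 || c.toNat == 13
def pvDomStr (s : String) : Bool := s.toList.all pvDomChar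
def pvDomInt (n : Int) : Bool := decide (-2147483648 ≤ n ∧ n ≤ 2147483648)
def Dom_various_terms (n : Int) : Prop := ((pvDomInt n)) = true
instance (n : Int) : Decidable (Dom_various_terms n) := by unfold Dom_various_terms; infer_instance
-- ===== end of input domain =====

-- B replaces A's accumulating loop by a closed form (via isqrt) for the largest m whose triangular number is at most n; objective: simpler (shorter, loop-free derivation of m).

-- ===== PORT A =====
-- the for-loop over range(1, n+1) with state (changed_sum, addend) and an early return
def various_terms_loop (n : Int) : List Int → Int → List Int → List Int
  | [], _changed_sum, addend => addend
  | i :: rest, changed_sum, addend =>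
    if changed_sum + i > n then
      -- addend = addend[:-1]; addend.append(n - sum(addend)); return addend
      (PySem.List.slice addend none (some (-1))) ++
        [n - (PySem.List.slice addend none (some (-1))).sum]
    else
      various_terms_loop n rest (changed_sum + i) (addend ++ [i])

def various_terms (n : Int) : List Int :=
  various_terms_loop n (PySem.List.pyRange 1 (n + 1) 1) 0 []

-- ===== PORT B =====
-- math.isqrt(x) for x ≥ 0 is ported by hand as Nat.sqrt (exact: floor of the square root)
def pyIsqrt (x : Int) : Int := (Nat.sqrt x.toNat : Int)

def various_terms_alt (n : Int) : List Int :=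
  if n ≤ 0 then []
  else
    let m := PySem.Int.floordiv (pyIsqrt (8 * n + 1) - 1) 2
    PySem.List.pyRange 1 m 1 ++ [n - PySem.Int.floordiv ((m - 1) * m) 2]

-- ===== PRECONDITION & SPEC =====
def Spec_various_terms (n : Int) (out : List Int) : Prop := out = various_terms_alt n
instance (n : Int) (out : List Int) : Decidable (Spec_various_terms n out) := by unfold Spec_various_terms; infer_instance

-- ===== CLAIM (what is proved, stated in full; the proofs are below) =====
def Claim_equal_various_terms : Prop := ∀ (n : Int), Dom_various_terms n → Spec_various_terms n (various_terms n)

-- ===== LEMMAS AND PROOFS =====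

-- sum of 1 + 2 + … + m
lemma sum_pyRange_one_succ (m : Int) (hm : 0 ≤ m) :
    (PySem.List.pyRange 1 (m + 1) 1).sum = m * (m + 1) / 2 := by
  induction m, hm using Int.le_induction with
  | base => norm_num [PySem.List.pyRange_one_eq_nil (by norm_num : (0:Int) + 1 ≤ 1)]
  | succ k hk ih =>
    rw [PySem.List.pyRange_one_succ_right (by omega : (1:Int) ≤ k + 1)]
    rw [List.sum_append, ih]
    simp only [List.sum_cons, List.sum_nil]
    have h1 : k * (k + 1) = 2 * (k * (k + 1) / 2) := by
      rcases Int.even_mul_succ_self k with ⟨t, ht⟩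
      omega
    have h2 : (k + 1) * (k + 1 + 1) = k * (k + 1) + 2 * (k + 1) := by ring
    omega

lemma dropLast_pyRange_one (b : Int) (hb : 1 ≤ b) :
    (PySem.List.pyRange 1 (b + 1) 1).dropLast = PySem.List.pyRange 1 b 1 := by
  rw [PySem.List.pyRange_one_succ_right (by omega : (1:Int) ≤ b)]
  exact List.dropLast_concat

-- the loop never reaches the end of the range unless n = 1 (since 1+2+…+n > n for n ≥ 2)
lemma loop_terminal (n M i : Int) (hM1 : 1 ≤ M) (hlo : M * (M + 1) ≤ 2 * n)
    (h2 : i ≤ M + 1) (hMn : M ≤ n) (hge : n + 1 ≤ i) (s : Int) :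
    various_terms_loop n (PySem.List.pyRange i (n + 1) 1) s (PySem.List.pyRange 1 i 1)
      = PySem.List.pyRange 1 M 1 ++ [n - (M - 1) * M / 2] := by
  have hMeq : M = n := by omega
  have hn1 : n = 1 := by nlinarith
  have hi : i = 2 := by omega
  subst hn1; subst hi
  have hM1' : M = 1 := by omega
  subst hM1'
  rw [PySem.List.pyRange_one_eq_nil (by omega : (1:Int) + 1 ≤ 2)]
  show PySem.List.pyRange 1 2 1 = PySem.List.pyRange 1 1 1 ++ [1 - (1 - 1) * 1 / 2]
  decide

-- main loop invariant: entering iteration i with changed_sum = T(i-1) and addend = [1..i-1]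
lemma loop_eq (n M : Int) (hM1 : 1 ≤ M) (hlo : M * (M + 1) ≤ 2 * n)
    (hhi : 2 * n < (M + 1) * (M + 2)) :
    ∀ (fuel : Nat) (i : Int), 1 ≤ i → i ≤ M + 1 → (i - 1) * i ≤ 2 * n →
      (n + 1 - i).toNat ≤ fuel →
    various_terms_loop n (PySem.List.pyRange i (n + 1) 1) ((i - 1) * i / 2)
        (PySem.List.pyRange 1 i 1)
      = PySem.List.pyRange 1 M 1 ++ [n - (M - 1) * M / 2] := by
  have hMn : M ≤ n := by nlinarith
  intro fuel
  induction fuel with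
  | zero =>
    intro i h1 h2 _ h4
    exact loop_terminal n M i hM1 hlo h2 hMn (by omega) _
  | succ fuel ih =>
    intro i h1 h2 h3 h4
    by_cases hlt : i < n + 1
    · rw [PySem.List.pyRange_one_cons hlt]
      show (if (i - 1) * i / 2 + i > n then _ else _) = _
      have heven : ∃ t, (i - 1) * i = 2 * t := by
        rcases Int.even_mul_succ_self (i - 1) with ⟨t, ht⟩
        exact ⟨t, by rw [show (i-1) * i = (i-1) * ((i-1)+1) by ring]; omega⟩
      obtain ⟨t, ht⟩ := heven
      have hnext : i * (i + 1) = (i - 1) * i + 2 * i := by ring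
      by_cases htrig : (i - 1) * i / 2 + i > n
      · rw [if_pos htrig]
        have h2n : 2 * n < i * (i + 1) := by omega
        have hMi : M < i := by
          by_contra h
          push Not at h
          nlinarith [mul_nonneg (by omega : (0:Int) ≤ M - i) (by omega : (0:Int) ≤ M + i + 1)]
        have hiM : i = M + 1 := by omega
        rw [PySem.List.slice_to_neg_one]
        rw [show i = (i - 1) + 1 by ring, dropLast_pyRange_one (i - 1) (by omega)]
        rw [show i - 1 = M by omega]
        rw [show M = (M - 1) + 1 by ring, sum_pyRange_one_succ (M - 1) (by omega)]
        rw [show M - 1 + 1 = M by ring]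
      · rw [if_neg htrig]
        have h2n : i * (i + 1) ≤ 2 * n := by omega
        have hiM : i ≤ M := by
          by_contra h
          push Not at h
          nlinarith [mul_nonneg (by omega : (0:Int) ≤ i - M - 1) (by omega : (0:Int) ≤ i + M + 2)]
        have e1 : (i + 1 - 1) * (i + 1) = 2 * t + 2 * i := by
          rw [show (i + 1 - 1) * (i + 1) = (i - 1) * i + 2 * i by ring, ht]
        have hs : (i - 1) * i / 2 + i = (i + 1 - 1) * (i + 1) / 2 := by omega
        rw [hs, ← PySem.List.pyRange_one_succ_right (by omega : (1:Int) ≤ i)]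
        exact ih (i + 1) (by omega) (by omega) (by omega) (by omega)
    · exact loop_terminal n M i hM1 hlo h2 hMn (by omega) _

-- the m computed by B from isqrt is the largest m with m(m+1)/2 ≤ n
lemma isqrt_m_bounds (n : Int) (hn : 1 ≤ n) :
    1 ≤ PySem.Int.floordiv (pyIsqrt (8 * n + 1) - 1) 2 ∧
    (PySem.Int.floordiv (pyIsqrt (8 * n + 1) - 1) 2) *
      (PySem.Int.floordiv (pyIsqrt (8 * n + 1) - 1) 2 + 1) ≤ 2 * n ∧
    2 * n < (PySem.Int.floordiv (pyIsqrt (8 * n + 1) - 1) 2 + 1) *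
      (PySem.Int.floordiv (pyIsqrt (8 * n + 1) - 1) 2 + 2) := by
  have hx : ((8 * n + 1).toNat : Int) = 8 * n + 1 := Int.toNat_of_nonneg (by omega)
  set x := (8 * n + 1).toNat with hxdef
  have hle : (Nat.sqrt x) * (Nat.sqrt x) ≤ x := by
    simpa [pow_two] using Nat.sqrt_le' x
  have hlt : x < (Nat.sqrt x + 1) * (Nat.sqrt x + 1) := by
    simpa [pow_two] using Nat.lt_succ_sqrt' x
  have h3 : 3 ≤ Nat.sqrt x := by
    rw [Nat.le_sqrt']
    omega
  set si : Int := (Nat.sqrt x : Int) with hsidef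
  have hsile : si * si ≤ 8 * n + 1 := by
    calc si * si = ((Nat.sqrt x * Nat.sqrt x : Nat) : Int) := by push_cast; ring
    _ ≤ ((x : Nat) : Int) := by exact_mod_cast hle
    _ = 8 * n + 1 := hx
  have hsilt : 8 * n + 1 < (si + 1) * (si + 1) := by
    calc 8 * n + 1 = ((x : Nat) : Int) := hx.symm
    _ < (((Nat.sqrt x + 1) * (Nat.sqrt x + 1) : Nat) : Int) := by exact_mod_cast hlt
    _ = (si + 1) * (si + 1) := by push_cast; ring
  have hsi3 : 3 ≤ si := by rw [hsidef]; exact_mod_cast h3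
  have hfd : PySem.Int.floordiv (pyIsqrt (8 * n + 1) - 1) 2 = (si - 1) / 2 := by
    rw [PySem.Int.floordiv_eq_ediv_of_pos (by norm_num)]
    rfl
  rw [hfd]
  set m : Int := (si - 1) / 2 with hmdef
  have hm2 : 2 * m + 1 ≤ si ∧ si ≤ 2 * m + 2 := by omega
  refine ⟨by omega, ?_, ?_⟩
  · nlinarith [mul_le_mul hm2.1 hm2.1 (by omega : (0:Int) ≤ 2 * m + 1) (by omega : (0:Int) ≤ si)]
  · nlinarith [mul_le_mul (by omega : si + 1 ≤ 2 * m + 3) (by omega : si + 1 ≤ 2 * m + 3)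
      (by omega : (0:Int) ≤ si + 1) (by omega : (0:Int) ≤ 2 * m + 3)]

-- ===== VERDICT (by name: the statement is the Claim_ definition above) =====
theorem various_terms_spec : Claim_equal_various_terms := by
  intro n _
  unfold Spec_various_terms various_terms various_terms_alt
  by_cases hn : n ≤ 0
  · rw [if_pos hn, PySem.List.pyRange_one_eq_nil (by omega : n + 1 ≤ 1)]
    rfl
  · rw [if_neg hn]
    push Not at hn
    obtain ⟨hM1, hlo, hhi⟩ := isqrt_m_bounds n (by omega)
    set M := PySem.Int.floordiv (pyIsqrt (8 * n + 1) - 1) 2 with hMdef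
    have h0 : (0 : Int) = (1 - 1) * 1 / 2 := by norm_num
    have hnil : (PySem.List.pyRange 1 1 1 : List Int) = [] := PySem.List.pyRange_one_eq_nil le_rfl
    rw [show various_terms_loop n (PySem.List.pyRange 1 (n + 1) 1) 0 [] =
         various_terms_loop n (PySem.List.pyRange 1 (n + 1) 1) ((1 - 1) * 1 / 2)
           (PySem.List.pyRange 1 1 1) by rw [hnil]; norm_num]
    rw [loop_eq n M hM1 hlo hhi (n + 1 - 1).toNat 1 (by omega) (by omega) (by omega) (by omega)]
    show _ = PySem.List.pyRange 1 M 1 ++ [n - PySem.Int.floordiv ((M - 1) * M) 2]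
    rw [PySem.Int.floordiv_eq_ediv_of_pos (by norm_num : (0:Int) < 2)]
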